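-- pv_equiv track=rewrite | github.com/AudsVale/Advent_of_Code_2020 | 10_Day_Code_part2.py | count_singles
-- ===== SOURCE A (Python) =====
-- def jump(my_list):
--     calc_jump = []
--     for i in range(0,(len(my_list)-1)):
--         calc_jump.append(my_list[i+1]-my_list[i])
--     calc_jump.append(3)
--     return calc_jump
--
-- def count_singles(my_list):
--     count_ones = []
--     count = 0
--     for jump in my_list:
--         if jump == 1:
--             count = count + 1
--         if jump == 3:
--             count_ones.append(count)
--             count = 0
--     return count_ones
-- ===== SOURCE B (Python) =====
-- def count_singles(my_list):
--     # B: split the list into segments delimited by 3, drop the unterminated tail,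
--     # then count the 1s in each closed segment (alternative decomposition).
--     segments = []
--     cur = []
--     for x in my_list:
--         if x == 3:
--             segments.append(cur)
--             cur = []
--         else:
--             cur.append(x)
--     return [seg.count(1) for seg in segments]
-- ===== Notes on version B (the rewrite author's own statement) =====
-- stated objective: alternative
-- what changed: Replaces A's single accumulating-counter pass with a two-phase decomposition: first split the input into segments delimited by 3 (dropping the unterminated tail), then count the 1s in each segment.
import Mathlib
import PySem

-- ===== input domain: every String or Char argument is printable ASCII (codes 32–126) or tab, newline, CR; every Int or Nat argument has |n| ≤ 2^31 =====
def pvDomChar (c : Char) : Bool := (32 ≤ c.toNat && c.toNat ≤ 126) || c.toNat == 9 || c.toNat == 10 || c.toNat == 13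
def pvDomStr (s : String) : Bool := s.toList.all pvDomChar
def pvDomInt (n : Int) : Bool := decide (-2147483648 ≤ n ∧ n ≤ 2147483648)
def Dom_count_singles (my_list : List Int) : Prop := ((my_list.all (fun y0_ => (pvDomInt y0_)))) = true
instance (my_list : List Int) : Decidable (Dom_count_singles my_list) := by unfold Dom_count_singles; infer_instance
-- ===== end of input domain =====

-- B splits the list into 3-delimited segments, then counts the 1s per segment (alternative decomposition; same cost).


-- ===== PORT A =====
-- literal transliteration: one pass, state (count_ones, count)
def count_singles (my_list : List Int) : List Int :=
  (my_list.foldl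
    (fun (s : List Int × Int) jump =>
      let s := if jump = 1 then (s.1, s.2 + 1) else s
      if jump = 3 then (s.1 ++ [s.2], 0) else s)
    ([], 0)).1

-- ===== PORT B =====
-- split into segments delimited by 3, dropping the unterminated trailing segment
def csSegs (cur : List Int) : List Int → List (List Int)
  | [] => []
  | x :: xs => if x = 3 then cur :: csSegs [] xs else csSegs (cur ++ [x]) xs

def count_singles_alt (my_list : List Int) : List Int :=
  (csSegs [] my_list).map (fun seg => (PySem.List.count seg 1 : Int))

-- ===== PRECONDITION & SPEC =====
def Spec_count_singles (my_list : List Int) (out : List Int) : Prop := out = count_singles_alt my_list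
instance (my_list : List Int) (out : List Int) : Decidable (Spec_count_singles my_list out) := by unfold Spec_count_singles; infer_instance

-- ===== CLAIM (what is proved, stated in full; the proofs are below) =====
def Claim_equal_count_singles : Prop := ∀ (my_list : List Int), Dom_count_singles my_list → Spec_count_singles my_list (count_singles my_list)

-- ===== LEMMAS AND PROOFS =====
theorem cs_count_append_one (cur : List Int) :
    ((PySem.List.count (cur ++ [1]) 1 : Int)) = (PySem.List.count cur 1 : Int) + 1 := by
  simp [PySem.List.count]

theorem cs_count_append_other (cur : List Int) (x : Int) (hx : x ≠ 1) :
    ((PySem.List.count (cur ++ [x]) 1 : Int)) = (PySem.List.count cur 1 : Int) := by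
  simp [PySem.List.count, List.count_append, hx]

theorem cs_main (l : List Int) (acc cur : List Int) (c : Int)
    (h : c = (PySem.List.count cur 1 : Int)) :
    (l.foldl
      (fun (s : List Int × Int) jump =>
        let s := if jump = 1 then (s.1, s.2 + 1) else s
        if jump = 3 then (s.1 ++ [s.2], 0) else s)
      (acc, c)).1 = acc ++ (csSegs cur l).map (fun seg => (PySem.List.count seg 1 : Int)) := by
  induction l generalizing acc cur c with
  | nil => simp [csSegs]
  | cons x xs ih =>
    by_cases h3 : x = 3
    · subst h3
      simp only [List.foldl_cons, csSegs]
      have := ih (acc ++ [c]) [] 0 (by simp [PySem.List.count])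
      simpa [h] using this
    · by_cases h1 : x = 1
      · subst h1
        simp only [List.foldl_cons, csSegs]
        have := ih acc (cur ++ [1]) (c + 1) (by rw [cs_count_append_one]; omega)
        simpa using this
      · simp only [List.foldl_cons, csSegs, h3, h1]
        have := ih acc (cur ++ [x]) c (by rw [cs_count_append_other cur x h1]; exact h)
        simpa [h3, h1] using this

-- ===== VERDICT (by name: the statement is the Claim_ definition above) =====
theorem count_singles_spec : Claim_equal_count_singles := by
  intro l _
  unfold Spec_count_singles count_singles count_singles_alt
  exact cs_main l [] [] 0 (by simp [PySem.List.count])
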